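-- pv_equiv track=rewrite | github.com/jhs9497/TIL | 개인문제풀이/SWEA/A형 모의고사/1493_4기_서울1반_옥종훈씨.py | findxy2
-- ===== SOURCE A (Python) =====
-- def findxy2(x, y):
--     result = [0, 2]
--     cnt = 0
--     while result[0] != x or result[1] != y: # x,y값에 도달하기 전까지 신선한 while문이군
--         if result[1] == 1: # 똑같이 진행하고
--             result[1] = result[0] + 1
--             result[0] = 1
--         else:
--             result[0] += 1
--             result[1] -= 1
--         cnt += 1
--     return cnt  # 카운트를 리턴한다
-- ===== SOURCE B (Python) =====
-- def findxy2(x, y):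
--     # Closed form: (x, y) is the x-th pair on diagonal s = x + y; the diagonals
--     # 2, 3, ..., s-1 contribute (s-2)(s-1)/2 earlier pairs.
--     s = x + y
--     return (s - 2) * (s - 1) // 2 + x
-- ===== Notes on version B (the rewrite author's own statement) =====
-- stated objective: faster
-- what changed: Replaced the step-by-step diagonal walk with the closed-form index (x+y-2)*(x+y-1)//2 + x.
import Mathlib
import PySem

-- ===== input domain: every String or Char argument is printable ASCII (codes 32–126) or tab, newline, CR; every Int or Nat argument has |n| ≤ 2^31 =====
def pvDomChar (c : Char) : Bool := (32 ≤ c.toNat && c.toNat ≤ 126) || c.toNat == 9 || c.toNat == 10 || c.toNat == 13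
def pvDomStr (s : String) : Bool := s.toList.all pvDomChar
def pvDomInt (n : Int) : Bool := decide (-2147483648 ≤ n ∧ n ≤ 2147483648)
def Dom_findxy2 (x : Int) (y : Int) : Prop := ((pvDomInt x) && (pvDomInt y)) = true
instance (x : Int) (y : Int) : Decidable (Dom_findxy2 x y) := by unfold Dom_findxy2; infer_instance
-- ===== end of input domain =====

-- B replaces A's step-by-step diagonal walk with the closed-form index
-- (x+y-2)*(x+y-1)//2 + x (objective: faster, O(1) instead of O(result)).


-- ===== PORT A =====
-- A's while-loop, step for step (state [a, b] and cnt); the Nat fuel only makes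
-- the recursion total — Pre_findxy2 guarantees it is never exhausted.
def findxy2Loop (x y : Int) : Nat → Int → Int → Int → Int
  | 0, _, _, cnt => cnt
  | Nat.succ fuel, a, b, cnt =>
    if a ≠ x ∨ b ≠ y then
      if b = 1 then findxy2Loop x y fuel 1 (a + 1) (cnt + 1)
      else findxy2Loop x y fuel (a + 1) (b - 1) (cnt + 1)
    else cnt

def findxy2 (x : Int) (y : Int) : Int :=
  findxy2Loop x y ((x + y) * (x + y) + x + 1).toNat 0 2 0

-- ===== PORT B =====
def findxy2_alt (x : Int) (y : Int) : Int :=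
  PySem.Int.floordiv ((x + y - 2) * (x + y - 1)) 2 + x

-- ===== PRECONDITION & SPEC =====
-- Pre_ is exactly the set of inputs on which A's while-loop terminates: the
-- loop's initial state and the enumerated pairs with x ≥ 1 and y ≥ 1; on every
-- other input A loops forever (it never returns), so nothing is excluded that
-- A returns on.
def Pre_findxy2 (x : Int) (y : Int) : Prop := (x = 0 ∧ y = 2) ∨ (1 ≤ x ∧ 1 ≤ y)
instance (x : Int) (y : Int) : Decidable (Pre_findxy2 x y) := by unfold Pre_findxy2; infer_instance

def pvWitness_findxy2 : Int × Int := (3, 4)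

def Spec_findxy2 (x : Int) (y : Int) (out : Int) : Prop := out = findxy2_alt x y
instance (x : Int) (y : Int) (out : Int) : Decidable (Spec_findxy2 x y out) := by unfold Spec_findxy2; infer_instance

-- ===== CLAIM (what is proved, stated in full; the proofs are below) =====
def Claim_equal_findxy2 : Prop := ∀ (x : Int) (y : Int), Dom_findxy2 x y → Pre_findxy2 x y → Spec_findxy2 x y (findxy2 x y)

-- ===== LEMMAS AND PROOFS =====

-- twice the 0-based index of the state (a, b) in A's visiting order
def pvIdx2 (a b : Int) : Int := (a + b - 2) * (a + b - 1) + 2 * a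

lemma pvIdx2_valid_lb {a b : Int} (h : Pre_findxy2 a b) : 0 ≤ pvIdx2 a b := by
  unfold Pre_findxy2 at h
  unfold pvIdx2
  rcases h with ⟨ha, hb⟩ | ⟨ha, hb⟩
  · subst ha; subst hb; norm_num
  · nlinarith

lemma pvIdx2_inj {a b x y : Int} (hab : Pre_findxy2 a b) (hxy : Pre_findxy2 x y)
    (h : pvIdx2 a b = pvIdx2 x y) : a = x ∧ b = y := by
  unfold Pre_findxy2 at hab hxy
  unfold pvIdx2 at h
  rcases hab with ⟨ha, hb⟩ | ⟨ha, hb⟩ <;> rcases hxy with ⟨hx, hy⟩ | ⟨hx, hy⟩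
  · subst ha; subst hb; subst hx; subst hy; exact ⟨rfl, rfl⟩
  · exfalso; subst ha; subst hb; nlinarith
  · exfalso; subst hx; subst hy; nlinarith
  · -- both states have a, b ≥ 1; compare diagonals s = a + b and t = x + y
    have hs : 2 ≤ a + b := by omega
    have ht : 2 ≤ x + y := by omega
    have hst : a + b = x + y := by
      by_contra hne
      rcases lt_or_gt_of_ne hne with hlt | hgt
      · have : (a + b - 1) * (a + b) ≤ (x + y - 2) * (x + y - 1) := by nlinarith
        nlinarith
      · have : (x + y - 1) * (x + y) ≤ (a + b - 2) * (a + b - 1) := by nlinarith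
        nlinarith
    have hprod : (a + b - 2) * (a + b - 1) = (x + y - 2) * (x + y - 1) := by rw [hst]
    constructor <;> omega

lemma pvStep_valid {a b : Int} (h : Pre_findxy2 a b) :
    (b = 1 → Pre_findxy2 1 (a + 1)) ∧ (b ≠ 1 → Pre_findxy2 (a + 1) (b - 1)) := by
  unfold Pre_findxy2 at h ⊢; omega

lemma pvStep_idx2_b1 {a : Int} : pvIdx2 1 (a + 1) = pvIdx2 a 1 + 2 := by
  unfold pvIdx2; ring

lemma pvStep_idx2_bne {a b : Int} : pvIdx2 (a + 1) (b - 1) = pvIdx2 a b + 2 := by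
  unfold pvIdx2; ring

lemma pvLoop_eq (x y : Int) (hxy : Pre_findxy2 x y) :
    ∀ (d : Nat) (a b cnt : Int) (fuel : Nat), Pre_findxy2 a b →
      2 * (d : Int) = pvIdx2 x y - pvIdx2 a b → d ≤ fuel →
      findxy2Loop x y fuel a b cnt = cnt + d := by
  intro d
  induction d with
  | zero =>
    intro a b cnt fuel hab hd hfuel
    have heq : pvIdx2 a b = pvIdx2 x y := by omega
    obtain ⟨hax, hby⟩ := pvIdx2_inj hab hxy heq
    subst hax; subst hby
    cases fuel with
    | zero => simp [findxy2Loop]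
    | succ f => simp [findxy2Loop]
  | succ d ih =>
    intro a b cnt fuel hab hd hfuel
    have hne : ¬(a = x ∧ b = y) := by
      rintro ⟨rfl, rfl⟩; omega
    cases fuel with
    | zero => omega
    | succ f =>
      have hcond : a ≠ x ∨ b ≠ y := by tauto
      rw [findxy2Loop, if_pos hcond]
      have hstep := pvStep_valid hab
      by_cases hb1 : b = 1
      · rw [if_pos hb1]
        have hidx : pvIdx2 1 (a + 1) = pvIdx2 a b + 2 := by
          rw [hb1]; exact pvStep_idx2_b1
        have := ih 1 (a + 1) (cnt + 1) f (hstep.1 hb1) (by rw [hidx]; omega)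
          (by omega)
        rw [this]; push_cast; ring
      · rw [if_neg hb1]
        have hidx : pvIdx2 (a + 1) (b - 1) = pvIdx2 a b + 2 := pvStep_idx2_bne
        have := ih (a + 1) (b - 1) (cnt + 1) f (hstep.2 hb1) (by rw [hidx]; omega)
          (by omega)
        rw [this]; push_cast; ring

-- ===== VERDICT (by name: the statement is the Claim_ definition above) =====
theorem findxy2_spec : Claim_equal_findxy2 := by
  unfold Claim_equal_findxy2
  intro x y _hdom hpre
  unfold Spec_findxy2
  -- pvIdx2 x y is even and nonnegative: write it as 2 * k, k ≥ 0
  have heven : ∃ m : Int, (x + y - 2) * (x + y - 1) = 2 * m := by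
    rcases Int.even_mul_succ_self (x + y - 2) with ⟨m, hm⟩
    exact ⟨m, by linarith [hm]⟩
  obtain ⟨m, hm⟩ := heven
  have hk : pvIdx2 x y = 2 * (m + x) := by unfold pvIdx2; omega
  have hk0 : 0 ≤ m + x := by have := pvIdx2_valid_lb hpre; omega
  -- the loop takes exactly (m + x) steps
  have hfuel : (m + x).toNat ≤ ((x + y) * (x + y) + x + 1).toNat := by
    have h1 : 2 * (m + x) ≤ 2 * ((x + y) * (x + y) + x + 1) := by
      rw [← hk]; unfold pvIdx2
      have hs : (x = 0 ∧ y = 2) ∨ (1 ≤ x ∧ 1 ≤ y) := hpre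
      rcases hs with ⟨rfl, rfl⟩ | ⟨hx, hy⟩
      · norm_num
      · nlinarith
    omega
  have hloop := pvLoop_eq x y hpre (m + x).toNat 0 2 0
      ((x + y) * (x + y) + x + 1).toNat (Or.inl ⟨rfl, rfl⟩)
      (by rw [hk, Int.toNat_of_nonneg hk0]; norm_num [pvIdx2]) hfuel
  unfold findxy2 findxy2_alt
  rw [hloop, hm]
  rw [PySem.Int.floordiv_eq_ediv_of_pos (by norm_num)]
  rw [Int.toNat_of_nonneg hk0]
  omega
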